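-- pv_equiv track=rewrite | github.com/haragam22/drivegpt | utils/data_pipeline.py | apply_hysteresis
-- ===== SOURCE A (Python) =====
-- HYSTERESIS_WINDOWS = 2  # Require N consecutive high-risk windows
--
-- def apply_hysteresis(vehicle_history, current_severity, window_size=HYSTERESIS_WINDOWS):
--     """
--     Apply hysteresis to prevent false alarms from single spikes.
--
--     Args:
--         vehicle_history: List of previous severity assessments
--         current_severity: Current severity assessment
--         window_size: Number of consecutive windows required
--
--     Returns:
--         str: Final severity after hysteresis
--     """
--     # Add current to history
--     vehicle_history.append(current_severity)
--
--     # Keep only last N windows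
--     if len(vehicle_history) > window_size:
--         vehicle_history.pop(0)
--
--     # Require N consecutive high-risk windows for Critical/Moderate
--     if len(vehicle_history) >= window_size:
--         if all(s == "Critical" for s in vehicle_history[-window_size:]):
--             return "Critical"
--         elif all(s in ["Critical", "Moderate"] for s in vehicle_history[-window_size:]):
--             return "Moderate"
--
--     # Otherwise return current (or downgrade)
--     return current_severity if len(vehicle_history) < window_size else "Routine"
-- ===== SOURCE B (Python) =====
-- _RANK = {'Critical': 2, 'Moderate': 1}
--
-- def apply_hysteresis(vehicle_history, current_severity, window_size=2):
--     # Same in-place bookkeeping as the original (append + bounded pop).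
--     vehicle_history.append(current_severity)
--     if len(vehicle_history) > window_size:
--         vehicle_history.pop(0)
--     if len(vehicle_history) < window_size:
--         return current_severity
--     m = min((_RANK.get(s, 0) for s in vehicle_history[-window_size:]), default=2)
--     return ('Routine', 'Moderate', 'Critical')[m]
-- ===== Notes on version B (the rewrite author's own statement) =====
-- stated objective: simpler
-- what changed: The two all() scans over the window are replaced by a single min over a severity-rank mapping ({'Critical':2,'Moderate':1,other:0}), with the minimum rank mapped back to the final severity string.
import Mathlib
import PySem

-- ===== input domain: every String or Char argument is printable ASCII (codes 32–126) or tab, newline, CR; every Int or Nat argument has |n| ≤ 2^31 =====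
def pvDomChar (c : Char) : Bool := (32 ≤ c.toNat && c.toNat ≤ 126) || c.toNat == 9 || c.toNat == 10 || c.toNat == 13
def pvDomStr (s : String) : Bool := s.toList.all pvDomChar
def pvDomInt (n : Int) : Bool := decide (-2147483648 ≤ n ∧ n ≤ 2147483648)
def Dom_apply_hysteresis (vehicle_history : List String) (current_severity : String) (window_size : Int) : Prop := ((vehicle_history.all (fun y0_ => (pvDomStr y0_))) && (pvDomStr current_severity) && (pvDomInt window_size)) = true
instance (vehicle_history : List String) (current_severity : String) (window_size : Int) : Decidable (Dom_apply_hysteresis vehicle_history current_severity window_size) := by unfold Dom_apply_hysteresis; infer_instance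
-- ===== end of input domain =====

-- B replaces A's two all() scans over the window by one min-fold over a severity-rank
-- mapping (simpler classification). Both Pythons mutate vehicle_history identically
-- (append + bounded pop(0)); the equivalence proved here is about the return value.

-- ===== PORT A =====
def apply_hysteresis (vehicle_history : List String) (current_severity : String) (window_size : Int) : String :=
  -- vehicle_history.append(current_severity)
  let vh := vehicle_history ++ [current_severity]
  -- if len > window_size: pop(0)  (vh ≠ [] here, so pop(0) = tail)
  let vh := if window_size < (vh.length : Int) then vh.tail else vh
  if window_size ≤ (vh.length : Int) then
    if (PySem.List.slice vh (some (-window_size)) none).all (fun s => s == "Critical") then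
      "Critical"
    else if (PySem.List.slice vh (some (-window_size)) none).all
        (fun s => s == "Critical" || s == "Moderate") then
      "Moderate"
    else
      -- falls through to the final return; len < window_size is false here
      if (vh.length : Int) < window_size then current_severity else "Routine"
  else
    if (vh.length : Int) < window_size then current_severity else "Routine"

-- ===== PORT B =====
-- _RANK.get(s, 0)
def pvRank (s : String) : Int :=
  if s == "Critical" then 2 else if s == "Moderate" then 1 else 0

def apply_hysteresis_alt (vehicle_history : List String) (current_severity : String) (window_size : Int) : String :=
  let vh := vehicle_history ++ [current_severity]
  let vh := if window_size < (vh.length : Int) then vh.tail else vh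
  if (vh.length : Int) < window_size then current_severity
  else
    -- min(ranks of the window, default=2): a min-fold with initial value 2
    let m := (PySem.List.slice vh (some (-window_size)) none).foldl
      (fun acc s => min acc (pvRank s)) 2
    if m == 2 then "Critical" else if m == 1 then "Moderate" else "Routine"

-- ===== PRECONDITION & SPEC =====
def Spec_apply_hysteresis (vehicle_history : List String) (current_severity : String) (window_size : Int) (out : String) : Prop := out = apply_hysteresis_alt vehicle_history current_severity window_size
instance (vehicle_history : List String) (current_severity : String) (window_size : Int) (out : String) : Decidable (Spec_apply_hysteresis vehicle_history current_severity window_size out) := by unfold Spec_apply_hysteresis; infer_instance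

-- ===== CLAIM (what is proved, stated in full; the proofs are below) =====
def Claim_equal_apply_hysteresis : Prop := ∀ (vehicle_history : List String) (current_severity : String) (window_size : Int), Dom_apply_hysteresis vehicle_history current_severity window_size → Spec_apply_hysteresis vehicle_history current_severity window_size (apply_hysteresis vehicle_history current_severity window_size)

-- ===== LEMMAS AND PROOFS =====

-- recursive minimum rank of a window, with "empty ↦ 2"
def pvRmin : List String → Int
  | [] => 2
  | s :: t => min (pvRank s) (pvRmin t)

lemma pvRank_le_two (s : String) : pvRank s ≤ 2 := by
  unfold pvRank; split_ifs <;> omega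

lemma pvRank_nonneg (s : String) : 0 ≤ pvRank s := by
  unfold pvRank; split_ifs <;> omega

lemma pvRmin_le_two (w : List String) : pvRmin w ≤ 2 := by
  induction w with
  | nil => simp [pvRmin]
  | cons s t ih => simp [pvRmin]; right; exact ih

lemma pvRmin_nonneg (w : List String) : 0 ≤ pvRmin w := by
  induction w with
  | nil => simp [pvRmin]
  | cons s t ih => simp [pvRmin]; exact ⟨pvRank_nonneg s, ih⟩

lemma foldl_min_eq_rmin (w : List String) (a : Int) (ha : a ≤ 2) :
    w.foldl (fun acc s => min acc (pvRank s)) a = min a (pvRmin w) := by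
  induction w generalizing a with
  | nil => simp [pvRmin]; omega
  | cons s t ih =>
      simp only [List.foldl_cons, pvRmin]
      rw [ih (min a (pvRank s)) (by have := pvRank_le_two s; omega)]
      omega

lemma rmin_eq_two_iff (w : List String) :
    pvRmin w = 2 ↔ w.all (fun s => s == "Critical") = true := by
  induction w with
  | nil => simp [pvRmin]
  | cons s t ih =>
      simp only [pvRmin, List.all_cons, Bool.and_eq_true, ← ih]
      have h2 := pvRmin_le_two t
      have hr := pvRank_le_two s
      constructor
      · intro h
        have hs : pvRank s = 2 := by omega
        refine ⟨?_, by omega⟩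
        unfold pvRank at hs
        split_ifs at hs with h1 h2' <;> first | exact h1 | omega
      · rintro ⟨hs, ht⟩
        have : pvRank s = 2 := by unfold pvRank; simp [hs]
        omega

lemma rmin_ge_one_iff (w : List String) :
    1 ≤ pvRmin w ↔ w.all (fun s => s == "Critical" || s == "Moderate") = true := by
  induction w with
  | nil => simp [pvRmin]
  | cons s t ih =>
      simp only [pvRmin, List.all_cons, Bool.and_eq_true, ← ih]
      constructor
      · intro h
        have hs : 1 ≤ pvRank s := by omega
        refine ⟨?_, by omega⟩
        unfold pvRank at hs
        by_cases hc : s == "Critical"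
        · simp [hc]
        · by_cases hm : s == "Moderate"
          · simp [hm]
          · simp [hc, hm] at hs
      · rintro ⟨hs, ht⟩
        have h1 : 1 ≤ pvRank s := by
          unfold pvRank
          rcases (Bool.or_eq_true _ _).mp hs with h | h
          · simp [h]
          · simp [h]; split_ifs <;> omega
        omega

-- ===== VERDICT (by name: the statement is the Claim_ definition above) =====
theorem apply_hysteresis_spec : Claim_equal_apply_hysteresis := by
  intro vehicle_history current_severity window_size _
  unfold Spec_apply_hysteresis apply_hysteresis apply_hysteresis_alt
  simp only
  generalize (if window_size < ((vehicle_history ++ [current_severity]).length : Int)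
      then (vehicle_history ++ [current_severity]).tail
      else vehicle_history ++ [current_severity]) = vh
  generalize PySem.List.slice vh (some (-window_size)) none = w
  rw [foldl_min_eq_rmin w 2 le_rfl, min_eq_right (pvRmin_le_two w)]
  have h2 := pvRmin_le_two w
  have h0 := pvRmin_nonneg w
  by_cases hlen : window_size ≤ (vh.length : Int)
  · rw [if_pos hlen, if_neg (by omega : ¬ (vh.length : Int) < window_size)]
    by_cases hc : w.all (fun s => s == "Critical") = true
    · have : pvRmin w = 2 := (rmin_eq_two_iff w).mpr hc
      simp [hc, this]
      exact fun hh => absurd hh (by omega)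
    · have hne2 : pvRmin w ≠ 2 := fun h => hc ((rmin_eq_two_iff w).mp h)
      by_cases hm : w.all (fun s => s == "Critical" || s == "Moderate") = true
      · have : pvRmin w = 1 := by
          have := (rmin_ge_one_iff w).mpr hm; omega
        simp [hc, hm, this]
        exact fun hh => absurd hh (by omega)
      · have : pvRmin w = 0 := by
          have : ¬ 1 ≤ pvRmin w := fun h => hm ((rmin_ge_one_iff w).mp h)
          omega
        simp [hc, hm, this]
        exact fun hh => absurd hh (by omega)
  · rw [if_neg hlen, if_pos (by omega : (vh.length : Int) < window_size),
        if_pos (by omega : (vh.length : Int) < window_size)]
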